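-- pv_equiv track=rewrite | github.com/Trustworthy-and-Responsible-AI-Lab/adaptive-vision-and-language-navigation | Standard-VLN/DUET/map_nav_src/r2r/vision_transformer.py | _extend_nav_idx
-- ===== SOURCE A (Python) =====
-- def _extend_nav_idx(nav_idx, k=4):
--     assert k > 0 and k <= 36, "k should be between 1 and 36"
--     extended_dict = {}
--     for idx in nav_idx:
--         for offset in range(-k, k+1):  # Extend by 4
--             new_idx = idx + offset
--             if 0 <= new_idx < 36:
--                 extension_level = abs(offset)
--                 if new_idx not in extended_dict or extension_level < extended_dict[new_idx]:
--                     extended_dict[new_idx] = extension_level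
--     return extended_dict
-- ===== SOURCE B (Python) =====
-- def _extend_nav_idx(nav_idx, k=4):
--     assert k > 0 and k <= 36, "k should be between 1 and 36"
--     extended_dict = {}
--     for idx in nav_idx:
--         for pos in range(max(0, idx - k), min(36, idx + k + 1)):
--             if pos not in extended_dict:
--                 extended_dict[pos] = min(abs(pos - j) for j in nav_idx)
--     return extended_dict
-- ===== Notes on version B (the rewrite author's own statement) =====
-- stated objective: alternative
-- what changed: Instead of spreading each nav index over offsets -k..k and repeatedly min-updating dict entries, B walks each index's clamped window [max(0,idx-k), min(36,idx+k+1)) and, the first time a position is touched, stores its final value directly as the closed-form minimum distance min(|pos-j| for j in nav_idx); no entry is ever updated.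
import Mathlib
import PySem

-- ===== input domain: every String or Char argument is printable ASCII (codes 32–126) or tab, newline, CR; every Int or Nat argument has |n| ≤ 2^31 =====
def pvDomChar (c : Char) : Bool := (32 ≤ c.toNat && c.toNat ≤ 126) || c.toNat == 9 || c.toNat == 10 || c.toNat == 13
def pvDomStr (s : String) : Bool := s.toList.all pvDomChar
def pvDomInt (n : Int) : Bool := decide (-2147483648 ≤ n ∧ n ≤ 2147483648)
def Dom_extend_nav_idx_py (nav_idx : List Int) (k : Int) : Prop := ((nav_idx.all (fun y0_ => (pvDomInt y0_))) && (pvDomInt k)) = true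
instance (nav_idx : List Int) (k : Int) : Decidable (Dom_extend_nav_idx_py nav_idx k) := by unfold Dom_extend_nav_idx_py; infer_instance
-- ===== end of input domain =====

-- B fills each dict entry once, at the first touch of a position, with its final value
-- min(|pos - j| for j in nav_idx) over a clamped window, instead of A's repeated min-updating
-- of entries across overlapping offset windows (objective: alternative; not claimed faster).

-- ===== PORT A =====
-- A's inner loop: for offset in range(-k, k+1): new_idx = idx + offset; guarded min-update of the dict
def aStep (k : Int) (d : PySem.Dict Int Int) (idx : Int) : PySem.Dict Int Int :=
  (PySem.List.pyRange (-k) (k + 1) 1).foldl (fun d off =>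
    if 0 ≤ idx + off ∧ idx + off < 36 then
      -- `new_idx not in extended_dict or extension_level < extended_dict[new_idx]`
      if d.contains (idx + off) = false ∨ |off| < d.getD (idx + off) 0 then
        d.insert (idx + off) |off|
      else d
    else d) d

def extend_nav_idx_py (nav_idx : List Int) (k : Int) : List (Int × Int) :=
  if 0 < k ∧ k ≤ 36 then
    (nav_idx.foldl (aStep k) PySem.Dict.empty).items
  else []  -- `assert` fails here: AssertionError (these inputs are excluded by Pre_)

-- ===== PORT B =====
-- min(abs(pos - j) for j in nav_idx); the `.getD 0` arm is dead code in the port: bVal is only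
-- called from inside the loop over nav_idx, where nav_idx is nonempty, so min? is `some` there.
def bVal (nav_idx : List Int) (pos : Int) : Int :=
  (PySem.List.min? (nav_idx.map (fun j => |pos - j|)) (fun y => y)).getD 0

-- B's inner loop: for pos in range(max(0, idx - k), min(36, idx + k + 1)): insert on first touch
def bStep (nav_idx : List Int) (k : Int) (d : PySem.Dict Int Int) (idx : Int) : PySem.Dict Int Int :=
  (PySem.List.pyRange (max 0 (idx - k)) (min 36 (idx + k + 1)) 1).foldl (fun d pos =>
    if d.contains pos then d else d.insert pos (bVal nav_idx pos)) d

def extend_nav_idx_py_alt (nav_idx : List Int) (k : Int) : List (Int × Int) :=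
  if 0 < k ∧ k ≤ 36 then
    (nav_idx.foldl (bStep nav_idx k) PySem.Dict.empty).items
  else []

-- ===== PRECONDITION & SPEC =====
-- Exactly the inputs on which A's `assert k > 0 and k <= 36` passes; on all others A raises AssertionError.
def Pre_extend_nav_idx_py (nav_idx : List Int) (k : Int) : Prop := 0 < k ∧ k ≤ 36
instance (nav_idx : List Int) (k : Int) : Decidable (Pre_extend_nav_idx_py nav_idx k) := by unfold Pre_extend_nav_idx_py; infer_instance
def pvWitness_extend_nav_idx_py : List Int × Int := ([3, 10], 4)

def Spec_extend_nav_idx_py (nav_idx : List Int) (k : Int) (out : List (Int × Int)) : Prop := out = extend_nav_idx_py_alt nav_idx k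
instance (nav_idx : List Int) (k : Int) (out : List (Int × Int)) : Decidable (Spec_extend_nav_idx_py nav_idx k out) := by unfold Spec_extend_nav_idx_py; infer_instance

-- ===== CLAIM (what is proved, stated in full; the proofs are below) =====
def Claim_equal_extend_nav_idx_py : Prop := ∀ (nav_idx : List Int) (k : Int), Dom_extend_nav_idx_py nav_idx k → Pre_extend_nav_idx_py nav_idx k → Spec_extend_nav_idx_py nav_idx k (extend_nav_idx_py nav_idx k)

-- ===== LEMMAS AND PROOFS =====

def dminS (l : List Int) (q : Int) : Int := l.foldl (fun m j => min m |q - j|) 37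

theorem dminS_eq_foldl_min (l : List Int) (q : Int) :
    dminS l q = (l.map (fun j => |q - j|)).foldl min 37 := by
  simp [dminS, List.foldl_map]

theorem dminS_le (l : List Int) (j q : Int) (h : j ∈ l) : dminS l q ≤ |q - j| := by
  rw [dminS_eq_foldl_min]
  exact (PySem.List.foldl_min_le _ 37).2 _ (List.mem_map_of_mem h)

theorem lt_dminS (l : List Int) (k q : Int) (hk : k ≤ 36) (h : ∀ j ∈ l, k < |q - j|) :
    k < dminS l q := by
  rw [dminS_eq_foldl_min]
  rcases PySem.List.foldl_min_mem (l.map (fun j => |q - j|)) 37 with h37 | hmem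
  · omega
  · rcases List.mem_map.mp hmem with ⟨j, hj, hje⟩
    rw [← hje]; exact h j hj

theorem dminS_append_singleton (l : List Int) (j q : Int) :
    dminS (l ++ [j]) q = min (dminS l q) |q - j| := by
  simp [dminS, List.foldl_append]

theorem bVal_eq_dminS (nav : List Int) (k q : Int) (hk : k ≤ 36)
    (hcov : ∃ j ∈ nav, |q - j| ≤ k) : bVal nav q = dminS nav q := by
  rcases nav with _ | ⟨x, t⟩
  · rcases hcov with ⟨j, hj, _⟩; simp at hj
  · rw [bVal, dminS_eq_foldl_min]
    simp only [List.map_cons]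
    rw [PySem.List.min?_id_cons, Option.getD_some, List.foldl_cons]
    rw [List.foldl_assoc]
    have hle : (t.map (fun j => |q - j|)).foldl min |q - x| ≤ 36 := by
      rcases hcov with ⟨j, hj, hjk⟩
      rcases List.mem_cons.mp hj with rfl | hjt
      · exact le_trans ((PySem.List.foldl_min_le _ _).1) (by omega)
      · exact le_trans ((PySem.List.foldl_min_le _ _).2 _ (List.mem_map_of_mem hjt)) (by omega)
    omega

theorem aInner_effect (idx : Int) : ∀ (ps : List Int) (d : PySem.Dict Int Int), ps.Nodup →
    d.keys.Nodup →
    ((ps.foldl (fun d p => if d.contains p = false ∨ |p - idx| < d.getD p 0 then d.insert p |p - idx| else d) d).keys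
        = d.keys ++ ps.filter (fun p => !d.contains p))
    ∧ (∀ q, (ps.foldl (fun d p => if d.contains p = false ∨ |p - idx| < d.getD p 0 then d.insert p |p - idx| else d) d).getD q 0
        = if q ∈ ps then (if d.contains q then min (d.getD q 0) |q - idx| else |q - idx|) else d.getD q 0) := by
  intro ps
  induction ps with
  | nil => intro d _ _; simp
  | cons p ps' ih =>
    intro d hnd hkd
    have hpns : p ∉ ps' := (List.nodup_cons.mp hnd).1
    set d' := if d.contains p = false ∨ |p - idx| < d.getD p 0 then d.insert p |p - idx| else d with hd'
    have hkeys' : d'.keys = d.keys ++ (if d.contains p then ([] : List Int) else [p]) := by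
      rw [hd']
      by_cases hc : d.contains p = true
      · rw [if_pos hc, List.append_nil]
        by_cases hlt : |p - idx| < d.getD p 0
        · rw [if_pos (Or.inr hlt)]
          exact PySem.Dict.keys_insert_of_contains d _ hc
        · rw [if_neg (by simp [hc, hlt])]
      · have hc' : d.contains p = false := by simpa using hc
        rw [if_neg hc, if_pos (Or.inl hc')]
        exact PySem.Dict.keys_insert_of_not_contains d _ hc'
    have hcont' : ∀ x, x ≠ p → d'.contains x = d.contains x := by
      intro x hx
      rw [hd']
      split
      · rw [PySem.Dict.contains_insert]; simp [hx]
      · rfl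
    have hgd'p : d'.getD p 0 = (if d.contains p then min (d.getD p 0) |p - idx| else |p - idx|) := by
      rw [hd']
      by_cases hc : d.contains p = true
      · rw [if_pos hc]
        by_cases hlt : |p - idx| < d.getD p 0
        · rw [if_pos (Or.inr hlt), PySem.Dict.getD_insert_self]; omega
        · rw [if_neg (by simp [hc, hlt])]; omega
      · have hc' : d.contains p = false := by simpa using hc
        rw [if_neg hc, if_pos (Or.inl hc'), PySem.Dict.getD_insert_self]
    have hgd' : ∀ x, x ≠ p → d'.getD x 0 = d.getD x 0 := by
      intro x hx
      rw [hd']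
      split
      · exact PySem.Dict.getD_insert_of_ne d _ _ hx
      · rfl
    have hkd' : d'.keys.Nodup := by
      rw [hkeys']
      by_cases hc : d.contains p = true
      · simpa [hc] using hkd
      · have hc' : d.contains p = false := by simpa using hc
        rw [if_neg hc]
        refine List.Nodup.append hkd (List.nodup_singleton p) ?_
        intro a ha hap
        rcases List.mem_singleton.mp hap with rfl
        exact absurd ((PySem.Dict.contains_iff_mem_keys d a).mpr ha) (by simp [hc'])
    obtain ⟨ihk, ihv⟩ := ih d' (List.nodup_cons.mp hnd).2 hkd'
    constructor
    · rw [List.foldl_cons, ← hd', ihk, hkeys', List.append_assoc]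
      congr 1
      rw [List.filter_congr (fun x hx => by rw [hcont' x (fun h => hpns (h ▸ hx))])]
      by_cases hc : d.contains p = true
      · simp [hc]
      · have hc' : d.contains p = false := by simpa using hc
        simp [hc']
    · intro q
      rw [List.foldl_cons, ← hd', ihv q]
      by_cases hq : q ∈ ps'
      · have hqp : q ≠ p := fun h => hpns (h ▸ hq)
        rw [if_pos hq, hcont' q hqp, hgd' q hqp, if_pos (List.mem_cons_of_mem p hq)]
      · by_cases hqp : q = p
        · subst hqp
          rw [if_neg hq, if_pos (List.mem_cons_self), hgd'p]
        · rw [if_neg hq, if_neg (by simp [hq, hqp]), hgd' q hqp]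

theorem bInner_effect (nav : List Int) : ∀ (ps : List Int) (d : PySem.Dict Int Int), ps.Nodup →
    ((ps.foldl (fun d p => if d.contains p then d else d.insert p (bVal nav p)) d).keys
        = d.keys ++ ps.filter (fun p => !d.contains p))
    ∧ (∀ q, (ps.foldl (fun d p => if d.contains p then d else d.insert p (bVal nav p)) d).getD q 0
        = if q ∈ ps ∧ ¬ (d.contains q = true) then bVal nav q else d.getD q 0) := by
  intro ps
  induction ps with
  | nil => intro d _; simp
  | cons p ps' ih =>
    intro d hnd
    have hpns : p ∉ ps' := (List.nodup_cons.mp hnd).1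
    set d' := if d.contains p then d else d.insert p (bVal nav p) with hd'
    have hcont' : ∀ x, x ≠ p → d'.contains x = d.contains x := by
      intro x hx
      rw [hd']
      split
      · rfl
      · rw [PySem.Dict.contains_insert]; simp [hx]
    have hkeys' : d'.keys = d.keys ++ (if d.contains p then ([] : List Int) else [p]) := by
      rw [hd']
      by_cases hc : d.contains p = true
      · rw [if_pos hc, if_pos hc, List.append_nil]
      · have hc' : d.contains p = false := by simpa using hc
        rw [if_neg hc, if_neg hc]
        exact PySem.Dict.keys_insert_of_not_contains d _ hc'
    have hgd'p : d'.getD p 0 = (if d.contains p then d.getD p 0 else bVal nav p) := by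
      rw [hd']
      by_cases hc : d.contains p = true
      · rw [if_pos hc, if_pos hc]
      · rw [if_neg hc, if_neg hc, PySem.Dict.getD_insert_self]
    have hgd' : ∀ x, x ≠ p → d'.getD x 0 = d.getD x 0 := by
      intro x hx
      rw [hd']
      split
      · rfl
      · exact PySem.Dict.getD_insert_of_ne d _ _ hx
    obtain ⟨ihk, ihv⟩ := ih d' (List.nodup_cons.mp hnd).2
    constructor
    · rw [List.foldl_cons, ← hd', ihk, hkeys', List.append_assoc]
      congr 1
      rw [List.filter_congr (fun x hx => by rw [hcont' x (fun h => hpns (h ▸ hx))])]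
      by_cases hc : d.contains p = true
      · simp [hc]
      · have hc' : d.contains p = false := by simpa using hc
        simp [hc']
    · intro q
      rw [List.foldl_cons, ← hd', ihv q]
      by_cases hq : q ∈ ps'
      · have hqp : q ≠ p := fun h => hpns (h ▸ hq)
        rw [hcont' q hqp, hgd' q hqp]
        by_cases hcq : d.contains q = true
        · rw [if_neg (by simp [hcq]), if_neg (by simp [hcq])]
        · rw [if_pos ⟨hq, hcq⟩, if_pos ⟨List.mem_cons_of_mem p hq, hcq⟩]
      · by_cases hqp : q = p
        · subst hqp
          rw [if_neg (by simp [hq]), hgd'p]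
          by_cases hcq : d.contains q = true
          · rw [if_pos hcq, if_neg (by simp [hcq])]
          · rw [if_neg hcq, if_pos ⟨List.mem_cons_self, hcq⟩]
        · rw [if_neg (by simp [hq]), if_neg (by simp [hq, hqp]), hgd' q hqp]

theorem filter_pyRange_window (a b : Int) :
    (PySem.List.pyRange a b 1).filter (fun p => decide (0 ≤ p ∧ p < 36))
      = PySem.List.pyRange (max 0 a) (min 36 b) 1 := by
  apply List.Perm.eq_of_pairwise (le := fun x y => x < y)
  · intro x y _ _ h1 h2; omega
  · exact (PySem.List.pairwise_lt_pyRange_one a b).sublist List.filter_sublist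
  · exact PySem.List.pairwise_lt_pyRange_one _ _
  · rw [List.perm_ext_iff_of_nodup ((PySem.List.nodup_pyRange_one a b).filter _)
      (PySem.List.nodup_pyRange_one _ _)]
    intro x
    simp only [List.mem_filter, PySem.List.mem_pyRange_one, decide_eq_true_eq]
    omega

theorem aStep_eq_window (k idx : Int) (d : PySem.Dict Int Int) :
    aStep k d idx = (PySem.List.pyRange (max 0 (idx - k)) (min 36 (idx + k + 1)) 1).foldl
      (fun d p => if d.contains p = false ∨ |p - idx| < d.getD p 0 then d.insert p |p - idx| else d) d := by
  have hcv : aStep k d idx = (PySem.List.pyRange (idx - k) (idx + k + 1) 1).foldl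
      (fun d p => if 0 ≤ p ∧ p < 36 then
        (if d.contains p = false ∨ |p - idx| < d.getD p 0 then d.insert p |p - idx| else d) else d) d := by
    rw [aStep, PySem.List.pyRange_one (-k) (k+1), PySem.List.pyRange_one (idx - k) (idx + k + 1),
      List.foldl_map, List.foldl_map]
    have hn : ((k + 1) - (-k)).toNat = ((idx + k + 1) - (idx - k)).toNat := by omega
    rw [hn]
    apply PySem.List.foldl_congr_mem
    intro acc i _
    have h1 : idx + (-k + (i : Int)) = idx - k + (i : Int) := by ring
    have h2 : |(-k + (i : Int))| = |idx - k + (i : Int) - idx| := by congr 1; ring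
    rw [h1, h2]
  refine hcv.trans ((PySem.List.foldl_ite_eq_foldl_filter (fun p => 0 ≤ p ∧ p < 36)
    (fun (d : PySem.Dict Int Int) (p : Int) => if d.contains p = false ∨ |p - idx| < d.getD p 0 then d.insert p |p - idx| else d)
    _ _).trans ?_)
  rw [filter_pyRange_window]
theorem outer_inv (nav : List Int) (k : Int) (hk : 0 < k) (hk36 : k ≤ 36) :
    ∀ (rest pre : List Int) (dA dB : PySem.Dict Int Int), pre ++ rest = nav →
    dA.keys = dB.keys → dA.keys.Nodup →
    (∀ q, q ∈ dA.keys ↔ (0 ≤ q ∧ q < 36 ∧ ∃ j ∈ pre, |q - j| ≤ k)) →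
    (∀ q ∈ dA.keys, dA.getD q 0 = dminS pre q) →
    (∀ q ∈ dB.keys, dB.getD q 0 = bVal nav q) →
    (rest.foldl (aStep k) dA).keys = (rest.foldl (bStep nav k) dB).keys ∧
    (rest.foldl (aStep k) dA).keys.Nodup ∧
    (∀ q, q ∈ (rest.foldl (aStep k) dA).keys ↔ (0 ≤ q ∧ q < 36 ∧ ∃ j ∈ nav, |q - j| ≤ k)) ∧
    (∀ q ∈ (rest.foldl (aStep k) dA).keys, (rest.foldl (aStep k) dA).getD q 0 = dminS nav q) ∧
    (∀ q ∈ (rest.foldl (bStep nav k) dB).keys, (rest.foldl (bStep nav k) dB).getD q 0 = bVal nav q) := by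
  intro rest
  induction rest with
  | nil =>
    intro pre dA dB hpre hkeys hnd hmem hA hB
    have : pre = nav := by simpa using hpre
    subst this
    exact ⟨hkeys, hnd, hmem, hA, hB⟩
  | cons idx rest' ih =>
    intro pre dA dB hpre hkeys hnd hmem hA hB
    simp only [List.foldl_cons]
    set lo := max 0 (idx - k) with hlo
    set hi := min 36 (idx + k + 1) with hhi
    set ps := PySem.List.pyRange lo hi 1 with hps
    have hpsmem : ∀ p, p ∈ ps ↔ (0 ≤ p ∧ p < 36 ∧ |p - idx| ≤ k) := by
      intro p
      rw [hps, PySem.List.mem_pyRange_one]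
      rw [abs_le]
      omega
    have hpsnd : ps.Nodup := PySem.List.nodup_pyRange_one _ _
    obtain ⟨hak, hav⟩ := aInner_effect idx ps dA hpsnd hnd
    obtain ⟨hbk, hbv⟩ := bInner_effect nav ps dB hpsnd
    rw [← aStep_eq_window] at hak hav
    have hbs : bStep nav k dB idx = ps.foldl (fun d pos =>
        if d.contains pos then d else d.insert pos (bVal nav pos)) dB := rfl
    rw [← hbs] at hbk hbv
    -- the two contains functions agree
    have hcontAB : ∀ x, dA.contains x = dB.contains x := by
      intro x
      rw [PySem.Dict.contains_eq_decide_mem_keys, PySem.Dict.contains_eq_decide_mem_keys, hkeys]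
    -- new keys
    have hkeys' : (aStep k dA idx).keys = (bStep nav k dB idx).keys := by
      rw [hak, hbk, hkeys, List.filter_congr (fun x _ => by rw [hcontAB x])]
    -- nodup of the new A keys
    have hnd' : (aStep k dA idx).keys.Nodup := by
      rw [hak]
      refine List.Nodup.append hnd (hpsnd.filter _) ?_
      intro a ha hfa
      have := (List.mem_filter.mp hfa).2
      rw [Bool.not_eq_true'] at this  -- `!dA.contains a = true` → contains = false
      exact absurd ((PySem.Dict.contains_iff_mem_keys dA a).mpr ha) (by simp_all)
    -- new membership characterisation
    have hmem' : ∀ q, q ∈ (aStep k dA idx).keys ↔ (0 ≤ q ∧ q < 36 ∧ ∃ j ∈ pre ++ [idx], |q - j| ≤ k) := by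
      intro q
      rw [hak, List.mem_append, List.mem_filter]
      constructor
      · rintro (hq | ⟨hq, _⟩)
        · obtain ⟨h1, h2, j, hj, hjk⟩ := (hmem q).mp hq
          exact ⟨h1, h2, j, List.mem_append_left _ hj, hjk⟩
        · obtain ⟨h1, h2, h3⟩ := (hpsmem q).mp hq
          exact ⟨h1, h2, idx, List.mem_append_right _ (List.mem_singleton.mpr rfl), h3⟩
      · rintro ⟨h1, h2, j, hj, hjk⟩
        by_cases hq : q ∈ dA.keys
        · exact Or.inl hq
        · right
          rcases List.mem_append.mp hj with hjp | hjs
          · exact absurd ((hmem q).mpr ⟨h1, h2, j, hjp, hjk⟩) hq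
          · rcases List.mem_singleton.mp hjs with rfl
            refine ⟨(hpsmem q).mpr ⟨h1, h2, hjk⟩, ?_⟩
            simp [PySem.Dict.contains_eq_decide_mem_keys, hq]
    -- A values w.r.t. pre ++ [idx]
    have hA' : ∀ q ∈ (aStep k dA idx).keys, (aStep k dA idx).getD q 0 = dminS (pre ++ [idx]) q := by
      intro q hq
      rw [hav q, dminS_append_singleton]
      by_cases hqps : q ∈ ps
      · rw [if_pos hqps]
        by_cases hc : dA.contains q = true
        · rw [if_pos hc, hA q ((PySem.Dict.contains_iff_mem_keys dA q).mp hc)]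
        · rw [if_neg hc]
          -- q is new: no element of pre is within k, so dminS pre q > k ≥ |q - idx|
          have hnotmem : q ∉ dA.keys := fun h => hc ((PySem.Dict.contains_iff_mem_keys dA q).mpr h)
          obtain ⟨h1, h2, h3⟩ := (hpsmem q).mp hqps
          have hfar : ∀ j ∈ pre, k < |q - j| := by
            intro j hj
            by_contra hle
            exact hnotmem ((hmem q).mpr ⟨h1, h2, j, hj, by omega⟩)
          have := lt_dminS pre k q hk36 hfar
          omega
      · rw [if_neg hqps]
        -- q was already present and lies outside idx's window: |q - idx| > k ≥ dminS pre q
        have hqmem : q ∈ dA.keys := by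
          rcases (List.mem_append.mp ((hak ▸ hq : q ∈ dA.keys ++ ps.filter fun p => !dA.contains p))) with h | h
          · exact h
          · exact absurd (List.mem_filter.mp h).1 hqps
        obtain ⟨h1, h2, j, hj, hjk⟩ := (hmem q).mp hqmem
        have hdle : dminS pre q ≤ k := le_trans (dminS_le pre j q hj) hjk
        have hqfar : k < |q - idx| := by
          by_contra hle
          exact hqps ((hpsmem q).mpr ⟨h1, h2, by omega⟩)
        rw [hA q hqmem]
        omega
    -- B values
    have hB' : ∀ q ∈ (bStep nav k dB idx).keys, (bStep nav k dB idx).getD q 0 = bVal nav q := by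
      intro q hq
      rw [hbv q]
      by_cases hcond : q ∈ ps ∧ ¬ (dB.contains q = true)
      · rw [if_pos hcond]
      · rw [if_neg hcond]
        -- q must already have been present
        have hqmem : q ∈ dB.keys := by
          rcases List.mem_append.mp (hbk ▸ hq : q ∈ dB.keys ++ ps.filter fun p => !dB.contains p) with h | h
          · exact h
          · have h2 := List.mem_filter.mp h
            exact absurd ⟨h2.1, by simpa using h2.2⟩ hcond
        exact hB q hqmem
    exact ih (pre ++ [idx]) (aStep k dA idx) (bStep nav k dB idx)
      (by rw [List.append_assoc]; simpa using hpre) hkeys' hnd' hmem' hA' hB'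

-- ===== VERDICT (by name: the statement is the Claim_ definition above) =====
theorem extend_nav_idx_py_spec : Claim_equal_extend_nav_idx_py := by
  intro nav k _ hpre
  obtain ⟨hk, hk36⟩ := hpre
  unfold Spec_extend_nav_idx_py extend_nav_idx_py extend_nav_idx_py_alt
  rw [if_pos ⟨hk, hk36⟩, if_pos ⟨hk, hk36⟩]
  obtain ⟨hkeys, hnd, hmem, hA, hB⟩ := outer_inv nav k hk hk36 nav [] PySem.Dict.empty PySem.Dict.empty
    (by simp) rfl (by simp) (by simp) (by simp) (by simp)
  rw [PySem.Dict.items_eq_map_keys _ hnd 0, PySem.Dict.items_eq_map_keys _ (hkeys ▸ hnd) 0, ← hkeys]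
  apply List.map_congr_left
  intro q hq
  have hcov := (hmem q).mp hq
  rw [hA q hq, hB q (hkeys ▸ hq), bVal_eq_dminS nav k q hk36 hcov.2.2]
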